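-- pv_equiv track=rewrite | github.com/AChangFeng/leetcode | algorithms/validUtf8.py | getNBytes
-- ===== SOURCE A (Python) =====
-- def getNBytes(i) -> int:
--     # start with 0
--     if not (i & (1 << 7)):
--         return 1
--     mask = 1 << 7
--     b_byte = 0
--     while mask & i:
--         b_byte += 1
--         mask = mask >> 1
--     # UTF8 char cant be start with 1XXXXXXX and cant start with 11111000
--     if b_byte == 1 or b_byte > 4:
--         return 0
--     return b_byte
-- ===== SOURCE B (Python) =====
-- def getNBytes(i) -> int:
--     b = i & 0xFF
--     n = 8 - (b ^ 0xFF).bit_length()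
--     if n == 0:
--         return 1
--     if n == 1 or n > 4:
--         return 0
--     return n
-- ===== Notes on version B (the rewrite author's own statement) =====
-- stated objective: simpler
-- what changed: A's bit-by-bit while loop over a descending mask is replaced by a closed form: mask off the low byte and obtain the leading-ones count directly from the bit_length of the complemented byte, then classify as before.
import Mathlib
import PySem

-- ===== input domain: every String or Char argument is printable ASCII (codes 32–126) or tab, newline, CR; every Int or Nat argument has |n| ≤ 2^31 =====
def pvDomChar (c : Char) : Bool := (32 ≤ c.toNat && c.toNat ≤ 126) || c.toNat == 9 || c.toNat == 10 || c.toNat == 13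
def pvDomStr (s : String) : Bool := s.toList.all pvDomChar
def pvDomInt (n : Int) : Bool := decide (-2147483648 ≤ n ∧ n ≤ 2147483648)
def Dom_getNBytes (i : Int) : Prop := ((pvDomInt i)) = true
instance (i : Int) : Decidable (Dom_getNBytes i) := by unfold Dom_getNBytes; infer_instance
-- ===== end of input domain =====

-- B replaces A's bit-by-bit while loop with a closed-form bit_length computation on the low byte (objective: simpler).

-- ===== PORT A =====
-- The while loop. The mask stays a nonnegative power of two in Python, so it is carried as a Nat;
-- the fuel argument only makes the recursion structural: starting from mask = 128 the mask reaches 0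
-- (where the loop condition is false) after at most 8 halvings, so fuel = 8 is never exhausted first.
def getNBytesLoop (fuel : Nat) (i : Int) (mask : Nat) (b_byte : Int) : Int :=
  match fuel with
  | 0 => b_byte
  | fuel + 1 =>
    if PySem.Int.band (mask : Int) i ≠ 0 then
      getNBytesLoop fuel i (mask >>> 1) (b_byte + 1)
    else b_byte

def getNBytes (i : Int) : Int :=
  if PySem.Int.band i ((1 : Int) <<< 7) = 0 then 1
  else
    let b_byte := getNBytesLoop 8 i ((1 : Nat) <<< 7) 0
    if b_byte = 1 ∨ b_byte > 4 then 0 else b_byte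

-- ===== PORT B =====
def getNBytes_alt (i : Int) : Int :=
  let b := PySem.Int.band i 255
  let n : Int := (8 : Int) - (PySem.Int.bitLength (PySem.Int.bxor b 255) : Int)
  if n = 0 then 1
  else if n = 1 ∨ n > 4 then 0
  else n

-- ===== PRECONDITION & SPEC =====
def Spec_getNBytes (i : Int) (out : Int) : Prop := out = getNBytes_alt i
instance (i : Int) (out : Int) : Decidable (Spec_getNBytes i out) := by unfold Spec_getNBytes; infer_instance

-- ===== CLAIM (what is proved, stated in full; the proofs are below) =====
def Claim_equal_getNBytes : Prop := ∀ (i : Int), Dom_getNBytes i → Spec_getNBytes i (getNBytes i)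

-- ===== LEMMAS AND PROOFS =====

-- bit k of (255 - y) is the complement of bit k of y, for y < 256, k < 8
set_option maxRecDepth 10000 in
theorem pvTestBitSub : ∀ (k : Fin 8) (y : Fin 256), (255 - y.val).testBit k.val = !(y.val.testBit k.val) := by decide

-- masking with 255 is reduction mod 256 (Python two's complement on negatives)
theorem pvBand255 (i : Int) : PySem.Int.band i 255 = i % 256 := by
  by_cases hi : 0 ≤ i
  · have h1 : i = ((i.toNat : Nat) : Int) := by omega
    rw [h1, show ((255 : Int)) = ((255 : Nat) : Int) from rfl, PySem.Int.band_natCast]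
    have h2 : i.toNat &&& 255 = i.toNat % 256 := by
      have := Nat.and_two_pow_sub_one_eq_mod i.toNat 8
      norm_num at this
      exact this
    rw [h2]; omega
  · unfold PySem.Int.band
    simp only [if_neg hi, if_pos (by norm_num : (0:Int) ≤ 255)]
    have h2 : (255 : Int).toNat &&& (-i - 1).toNat = (-i - 1).toNat % 256 := by
      have := Nat.and_two_pow_sub_one_eq_mod (-i - 1).toNat 8
      norm_num at this
      rw [Nat.land_comm] at this
      simpa using this
    rw [h2]
    omega

-- band with a low power of two only reads bit k of i mod 256
theorem pvBandPow (k : Nat) (hk : k < 8) (i : Int) :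
    PySem.Int.band ((2 ^ k : Nat) : Int) i = (((((i % 256).toNat).testBit k).toNat * 2 ^ k : Nat) : Int) := by
  by_cases hi : 0 ≤ i
  · have h1 : i = ((i.toNat : Nat) : Int) := by omega
    rw [h1, PySem.Int.band_natCast]
    have hr : (((i.toNat : Nat) : Int) % 256).toNat = i.toNat % 256 := by omega
    rw [hr, Nat.two_pow_and, show (256 : Nat) = 2 ^ 8 from rfl, Nat.testBit_mod_two_pow]
    simp [hk, Nat.mul_comm]
  · unfold PySem.Int.band
    simp only [if_neg hi, if_pos (Int.natCast_nonneg (2 ^ k))]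
    have ha : (((2 ^ k : Nat) : Int)).toNat = 2 ^ k := Int.toNat_natCast _
    set y := (-i - 1).toNat with hy
    have hr : (i % 256).toNat = 255 - y % 256 := by omega
    have hy' : y % 256 < 256 := Nat.mod_lt _ (by norm_num)
    have hb : (255 - y % 256).testBit k = !((y % 256).testBit k) :=
      pvTestBitSub ⟨k, hk⟩ ⟨y % 256, hy'⟩
    have hym : (y % 256).testBit k = y.testBit k := by
      rw [show (256 : Nat) = 2 ^ 8 from rfl, Nat.testBit_mod_two_pow]
      simp [hk]
    rw [ha, hr, hb, hym, Nat.two_pow_and]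
    cases h : y.testBit k <;> simp

-- the loop only reads i mod 256 while the mask is a power of two below 2^8
theorem pvLoopCong (k : Nat) (hk : k < 8) (i : Int) (b : Int) :
    getNBytesLoop (k + 1) i (2 ^ k) b = getNBytesLoop (k + 1) (i % 256) (2 ^ k) b := by
  induction k generalizing b with
  | zero =>
    show getNBytesLoop 1 i 1 b = getNBytesLoop 1 (i % 256) 1 b
    unfold getNBytesLoop
    have hc : PySem.Int.band ((1 : Nat) : Int) i = PySem.Int.band ((1 : Nat) : Int) (i % 256) := by
      rw [show ((1 : Nat) : Int) = ((2 ^ 0 : Nat) : Int) from rfl,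
        pvBandPow 0 (by omega), pvBandPow 0 (by omega)]
      have : (i % 256) % 256 = i % 256 := by omega
      rw [this]
    push_cast at hc ⊢
    rw [hc]
    split <;> rfl
  | succ n ih =>
    unfold getNBytesLoop
    have hc : PySem.Int.band ((2 ^ (n + 1) : Nat) : Int) i
        = PySem.Int.band ((2 ^ (n + 1) : Nat) : Int) (i % 256) := by
      rw [pvBandPow (n + 1) hk, pvBandPow (n + 1) hk]
      have : (i % 256) % 256 = i % 256 := by omega
      rw [this]
    push_cast at hc ⊢
    rw [hc]
    have hsh : (2 ^ (n + 1)) >>> 1 = 2 ^ n := by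
      simp [Nat.shiftRight_one, Nat.pow_succ]
    rw [hsh]
    split
    · exact ih (by omega) _
    · rfl

-- A only reads i mod 256
theorem pvAMod (i : Int) : getNBytes i = getNBytes (i % 256) := by
  unfold getNBytes
  have hc : PySem.Int.band i ((1 : Int) <<< 7) = PySem.Int.band (i % 256) ((1 : Int) <<< 7) := by
    rw [show ((1 : Int) <<< 7) = ((2 ^ 7 : Nat) : Int) from rfl,
      PySem.Int.band_comm, PySem.Int.band_comm (i % 256),
      pvBandPow 7 (by omega), pvBandPow 7 (by omega)]
    have : (i % 256) % 256 = i % 256 := by omega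
    rw [this]
  rw [hc]
  have hl : getNBytesLoop 8 i ((1 : Nat) <<< 7) 0 = getNBytesLoop 8 (i % 256) ((1 : Nat) <<< 7) 0 := by
    rw [show ((1 : Nat) <<< 7) = 2 ^ 7 from rfl]
    exact pvLoopCong 7 (by omega) i 0
  rw [hl]

-- B only reads i mod 256
theorem pvBMod (i : Int) : getNBytes_alt i = getNBytes_alt (i % 256) := by
  unfold getNBytes_alt
  rw [pvBand255, pvBand255]
  have : (i % 256) % 256 = i % 256 := by omega
  rw [this]

-- A = B on each of the 256 residues
set_option maxRecDepth 100000 in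
set_option maxHeartbeats 4000000 in
theorem pvFin : ∀ (r : Fin 256), getNBytes ((r.val : Nat) : Int) = getNBytes_alt ((r.val : Nat) : Int) := by decide

-- ===== VERDICT (by name: the statement is the Claim_ definition above) =====
theorem getNBytes_spec : Claim_equal_getNBytes := by
  intro i _
  unfold Spec_getNBytes
  rw [pvAMod, pvBMod]
  have h4 : (i % 256).toNat < 256 := by omega
  have h3 : i % 256 = (((i % 256).toNat : Nat) : Int) := by omega
  rw [h3]
  exact pvFin ⟨(i % 256).toNat, h4⟩
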